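/-
  DECODE FACTS IN BULK: one theorem per distinct instruction byte string of an image, and the look-up a stepper uses.

  A decode fact is

      theorem Vorbis.Dec.x4801d8 : ∀ has, Dec.IsInsn Dec.allCells (User.decMode has) [0x48, 0x01, 0xd8] s 3

  (`s` the `Sem` term the decoder finds; UserX/Decode.lean turns it into `User.Decodes` / `User.Step`). It is position
  independent: the same theorem serves every occurrence of the byte string, in this or another image. The term `s` is found
  by RUNNING the decoder (compiled code, X86/Derived/Dec/Find.lean); the kernel then checks the statement by evaluation.

      #udecode name "4801d8"                         one fact, named `name` in the current namespace
      #udecode_gated name [(Feature.bmi1, true)] "f3480fbcc3"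
                                                     one fact of a cell with CPUID-gated rows (`User.Gates`)
      #decode_all Vorbis.Dec "4801d8" "f30f59c1" …   one fact per string, named `Vorbis.Dec.x<hex>`; a string that does not
                                                     decode, or whose statement the kernel rejects, is REPORTED (an error
                                                     message naming the bytes) and the command goes on with the next one
      User.decodeFactExt                             environment extension: hex string ↦ name of the fact (every namespace)
      User.findDecodeFact? env bytes                 the fact of exactly these bytes, if one is in the environment
      User.decodeFactAt? env cand                    the instruction at the head of `cand` (≤ 15 bytes of code): length, fact
      User.decodeFactAt cand                         the same, decoding on the fly (a private name) when no fact is imported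
      User.DecodeFact.read name                      bytes, length, term, and `keep / len / body` of an ordinary instruction

  Nothing here is trusted: every fact is checked by the kernel against the model's decoder.
-/
import UserX.Decode
import Lean
open Lean Meta Elab Command

namespace X86
namespace User

/-! ### Byte strings as hexadecimal text -/

/-- Two lower-case hexadecimal digits. -/
def hexOfByte (b : UInt8) : String :=
  let digit (n : Nat) : Char := if n < 10 then Char.ofNat (48 + n) else Char.ofNat (87 + n)
  String.ofList [digit (b.toNat / 16), digit (b.toNat % 16)]

/-- A byte string as hexadecimal text, no separators: `[0x48, 0x01, 0xd8]` ↦ `"4801d8"`. -/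
def hexOfBytes (bytes : List UInt8) : String := String.join (bytes.map hexOfByte)

/-- The value of a hexadecimal digit. -/
def hexDigit? (c : Char) : Option Nat :=
  if '0' ≤ c && c ≤ '9' then some (c.toNat - 48)
  else if 'a' ≤ c && c ≤ 'f' then some (c.toNat - 87)
  else if 'A' ≤ c && c ≤ 'F' then some (c.toNat - 55)
  else none

/-- Parse hexadecimal text (blanks allowed between bytes): `"48 01 d8"` or `"4801d8"` ↦ `[0x48, 0x01, 0xd8]`. -/
def bytesOfHex? (s : String) : Option (List UInt8) :=
  let rec go (cs : List Char) (acc : List UInt8) : Option (List UInt8) :=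
    match cs with
    | [] => some acc.reverse
    | hi :: lo :: rest =>
      match hexDigit? hi, hexDigit? lo with
      | some h, some l => go rest (UInt8.ofNat (h * 16 + l) :: acc)
      | _, _ => none
    | [_] => none
  go (s.toList.filter fun c => c != ' ' && c != '_') []

/-! ### The environment extension: bytes ↦ fact -/

/-- The decode facts of the environment: hexadecimal text of the bytes ↦ name of the theorem. -/
initialize decodeFactExt : SimplePersistentEnvExtension (String × Name) (Std.HashMap String Name) ←
  registerSimplePersistentEnvExtension {
    addEntryFn := fun table entry => table.insert entry.1 entry.2
    addImportedFn := fun modules =>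
      modules.foldl (init := {}) fun table entries =>
        entries.foldl (init := table) fun table entry => table.insert entry.1 entry.2
  }

/-- The decode fact of exactly these bytes, if one is in the environment (imported, or made by this module). -/
def findDecodeFact? (env : Environment) (bytes : List UInt8) : Option Name :=
  (decodeFactExt.getState env).get? (hexOfBytes bytes)

/-- The instruction at the head of `cand` (at most 15 bytes of code) for which a fact exists: its length and the fact.
(x86 encodings are prefix-free: at most one prefix of `cand` is an instruction.) -/
def decodeFactAt? (env : Environment) (cand : List UInt8) : Option (Nat × Name) :=
  (List.range 16).findSome? fun len =>
    if len == 0 || len > cand.length then none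
    else (findDecodeFact? env (cand.take len)).map fun name => (len, name)

/-! ### Making a fact -/

/-- The mode the decoder is RUN in to find an instruction's term: the gates' answers, every other feature absent.
(The statement proved is for every `has` that answers the gates so.) -/
def findMode (gates : Gates) : DecMode := decMode (gates.apply fun _ => false)

/-- The type of a CPUID: `FeatureBit → Bool`. -/
def hasType : Expr := mkForall `f .default (mkConst ``X86.FeatureBit) (mkConst ``Bool)

/-- State `∀ has, Dec.IsInsn Dec.allCells (decMode (gates.apply has)) bytes s n` (`gates = []`: `decMode has`) for the
instruction `bytes` ARE, with the proof term `fun has μ => Eq.refl _`, which only the kernel checks. `none`: no row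
claims the bytes. An error: the bytes begin with a shorter instruction. -/
def decodeFactStatement (gates : Gates) (gatesE : Option Expr) (bytes : List UInt8) : MetaM (Option (Expr × Expr)) :=
  withLocalDeclD `has hasType fun has => do
    let hasE := match gatesE with
      | some g => mkApp2 (mkConst ``X86.User.Gates.apply) g has
      | none => has
    let modeE := mkApp (mkConst ``X86.User.decMode) hasE
    let some (stmt, len) ← Dec.isInsnStatement (mkConst ``X86.Dec.allCells) modeE (findMode gates) bytes
      | return none
    unless len == bytes.length do
      throwError "the instruction is the first {len} of the {bytes.length} bytes {hexOfBytes bytes}"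
    let proof ← kernelRflProof stmt
    return some (← mkForallFVars #[has] stmt, ← mkLambdaFVars #[has] proof)

/-- Add the decode fact of `bytes` as the theorem `name` and enter it in the extension. Errors: no row claims the bytes;
the kernel rejects the statement (then the term found is not what the decoder computes for every `has`: a CPUID-gated
row in the cell, or a defect of Find.lean's quoting). -/
def addDecodeFact (name : Name) (bytes : List UInt8) (gates : Gates := []) (gatesE : Option Expr := none) :
    MetaM Unit := do
  let some (type, value) ← decodeFactStatement gates gatesE bytes
    | throwError "no row of the model claims the bytes {hexOfBytes bytes}"
  addDecl <| .thmDecl { name := name, levelParams := [], type := type, value := value }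
  modifyEnv fun env => decodeFactExt.addEntry env (hexOfBytes bytes, name)

/-- `ns.x<hex>`: the name of the fact of a byte string in the namespace of an image. -/
def decodeFactName (ns : Name) (bytes : List UInt8) : Name := ns.str ("x" ++ hexOfBytes bytes)

/-- The name under which a byte string is decoded ON THE FLY: below the declaration being elaborated (the only names a
tactic may add), or private to the module at command level — two modules that both meet the instruction and are later
imported together do not clash. -/
def localDecodeFactName (env : Environment) (bytes : List UInt8) : Name :=
  let base := decodeFactName `X86.User.DecodedHere bytes
  match env.asyncPrefix? with
  | some p => (p ++ `_decoded).str ("x" ++ hexOfBytes bytes)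
  | none => mkPrivateName env base

/-- The decode fact of `bytes`: the one in the environment if there is one, else a new one. -/
def decodeFactFor (bytes : List UInt8) : MetaM Name := do
  let env ← getEnv
  if let some name := findDecodeFact? env bytes then return name
  let name := localDecodeFactName env bytes
  addDecodeFact name bytes
  return name

/-- The instruction at the head of `cand` (at most 15 bytes of code): its length and its decode fact, decoded now if no
fact is in the environment. -/
def decodeFactAt (cand : List UInt8) : MetaM (Nat × Name) := do
  if let some r := decodeFactAt? (← getEnv) cand then return r
  let some q := Dec.quoteBytes (findMode []) cand
    | throwError "no row of the model claims the bytes {hexOfBytes cand}"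
  return (q.len, ← decodeFactFor (cand.take q.len))

/-! ### Reading a fact -/

/-- What a decode fact says, taken apart for a stepper. -/
structure DecodeFact where
  /-- The theorem. -/
  name : Name
  /-- The gates' answers the fact assumes (`none`: it holds for every CPUID). -/
  gates : Option Expr
  /-- The byte list, as a term. -/
  bytes : Expr
  /-- The `Sem Unit` term. -/
  term : Expr
  /-- The encoded length. -/
  len : Nat
  /-- `keep`, `len`, `body` when the term is `Sem.instr keep len body` (every row but the `.own` ones). -/
  instr : Option (Expr × Expr × Expr)

/-- Take the statement of the fact `name` apart. -/
def DecodeFact.read (name : Name) : MetaM DecodeFact := do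
  let info ← getConstInfo name
  let .forallE _ _ body _ := info.type | throwError "not a decode fact: {name}"
  unless body.isAppOfArity ``X86.Dec.IsInsn 5 do throwError "not a decode fact: {name}"
  let modeE := body.getArg! 1
  let hasE := modeE.appArg!
  let gates := if hasE.isAppOfArity ``X86.User.Gates.apply 2 then some (hasE.getArg! 0) else none
  let term := body.getArg! 3
  let some len := (body.getArg! 4).rawNatLit? <|> (body.getArg! 4).nat?
    | throwError "decode fact {name}: the length is not a literal"
  let instr :=
    if term.isAppOfArity ``X86.Sem.instr 3 then some (term.getArg! 0, term.getArg! 1, term.getArg! 2) else none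
  return { name, gates, bytes := body.getArg! 2, term, len, instr }

/-! ### Commands -/

/-- The bytes a string literal spells. -/
def bytesOfSyntax (s : TSyntax `str) : CommandElabM (List UInt8) := do
  let some bytes := bytesOfHex? s.getString | throwErrorAt s "not hexadecimal bytes: {s.getString}"
  return bytes

/-- `#udecode name "4801d8"`: the decode fact of one instruction, as the theorem `name` of the current namespace. -/
elab "#udecode " name:ident bytes:str : command => do
  let bs ← bytesOfSyntax bytes
  let declName := (← getCurrNamespace) ++ name.getId
  liftTermElabM <| addDecodeFact declName bs
  logInfo m!"{declName} : {(← getEnv).find? declName |>.map (·.type)}"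

/-- `#udecode_gated name [(Feature.bmi1, true)] "f3480fbcc3"`: the decode fact of an instruction whose cell holds
CPUID-gated rows, for every CPUID that answers the listed features as listed. -/
elab "#udecode_gated " name:ident gates:term:max bytes:str : command => do
  let bs ← bytesOfSyntax bytes
  let declName := (← getCurrNamespace) ++ name.getId
  liftTermElabM do
    let gatesTy := mkConst ``X86.User.Gates
    let gatesE ← instantiateMVars (← Term.elabTermEnsuringType gates (some gatesTy))
    Term.synthesizeSyntheticMVarsNoPostponing
    let gatesE ← instantiateMVars gatesE
    let gatesV ← unsafe evalExpr Gates gatesTy gatesE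
    addDecodeFact declName bs gatesV (some gatesE)
  logInfo m!"{declName} : {(← getEnv).find? declName |>.map (·.type)}"

/-- `#decode_all Vorbis.Dec "4801d8" "f30f59c1" …`: one fact per byte string, named `Vorbis.Dec.x<hex>`. A string that
already has a fact in the environment is skipped. A string that fails is reported as an error and the rest goes on.
The summary gives the count and the milliseconds spent. -/
elab "#decode_all " ns:ident strings:str* : command => do
  let start ← IO.monoMsNow
  let mut made : Nat := 0
  let mut skipped : Nat := 0
  let mut failed : Nat := 0
  for s in strings do
    let bs ← bytesOfSyntax s
    if (findDecodeFact? (← getEnv) bs).isSome then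
      skipped := skipped + 1
      continue
    try
      liftTermElabM <| withCurrHeartbeats <| addDecodeFact (decodeFactName ns.getId bs) bs
      made := made + 1
    catch ex =>
      failed := failed + 1
      logErrorAt s m!"DECODE-FAIL {hexOfBytes bs}: {ex.toMessageData}"
  let stop ← IO.monoMsNow
  logInfo m!"#decode_all {ns.getId}: {made} facts, {skipped} already known, {failed} failed, {stop - start} ms"

end User
end X86
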